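-- pv_equiv track=rewrite | github.com/textlab/seq2seqDRSparser | train_model.py | quotation_process
-- ===== SOURCE A (Python) =====
-- def quotation_process(s):
--     in_quota=False
--     new_string = ''
--     for i in range(len(s)):
--         if s[i]=='"':
--             if in_quota:
--                 new_string+='"'
--                 in_quota =  False
--             else:
--                 in_quota = True
--                 new_string+='"'
--         elif s[i]==' ':
--             if not in_quota:
--                 new_string+= ' '
--         else:
--             new_string+=s[i]
--     return new_string
-- ===== SOURCE B (Python) =====
-- def quotation_process(s):
--     parts = s.split('"')
--     return '"'.join(p if i % 2 == 0 else p.replace(' ', '')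
--                     for i, p in enumerate(parts))
-- ===== Notes on version B (the rewrite author's own statement) =====
-- stated objective: faster
-- what changed: Replaced A's Python-level character-by-character scan with an in_quota flag by splitting on the double-quote character, stripping spaces (str.replace) from odd-index segments only, and rejoining on the double-quote character; the work moves into C-level str.split/replace/join.
import Mathlib
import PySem

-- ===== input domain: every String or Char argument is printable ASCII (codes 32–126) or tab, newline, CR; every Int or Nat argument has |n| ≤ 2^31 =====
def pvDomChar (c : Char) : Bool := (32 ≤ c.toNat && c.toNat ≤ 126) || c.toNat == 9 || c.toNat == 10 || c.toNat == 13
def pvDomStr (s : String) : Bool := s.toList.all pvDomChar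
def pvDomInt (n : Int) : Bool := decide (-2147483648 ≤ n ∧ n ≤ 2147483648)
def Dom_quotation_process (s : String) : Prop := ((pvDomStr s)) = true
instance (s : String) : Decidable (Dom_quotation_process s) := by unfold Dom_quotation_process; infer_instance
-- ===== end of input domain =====

-- B replaces A's stateful character scan by split-on-quote / process-odd-segments / rejoin (idiomatic decomposition); same return value.


-- ===== PORT A =====
-- one loop iteration of A: state = (in_quota, new_string as chars)
def qaStep (st : Bool × List Char) (c : Char) : Bool × List Char :=
  if c = '"' then
    if st.1 then (false, st.2 ++ ['"']) else (true, st.2 ++ ['"'])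
  else if c = ' ' then
    (if st.1 then st else (st.1, st.2 ++ [' ']))
  else
    (st.1, st.2 ++ [c])

def quotation_process (s : String) : String :=
  String.ofList ((s.toList.foldl qaStep (false, [])).2)

-- ===== PORT B =====
def quotation_process_alt (s : String) : String :=
  let parts : List String := (PySem.Str.split? s "\"").getD []
  PySem.Str.join "\"" ((PySem.List.enumerate parts).map
    (fun ip => if ip.1 % 2 == 0 then ip.2 else PySem.Str.replace ip.2 " " ""))

-- ===== PRECONDITION & SPEC =====
def Spec_quotation_process (s : String) (out : String) : Prop := out = quotation_process_alt s
instance (s : String) (out : String) : Decidable (Spec_quotation_process s out) := by unfold Spec_quotation_process; infer_instance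

-- ===== CLAIM (what is proved, stated in full; the proofs are below) =====
def Claim_equal_quotation_process : Prop := ∀ (s : String), Dom_quotation_process s → Spec_quotation_process s (quotation_process s)

-- ===== LEMMAS AND PROOFS =====

-- recursive characterisation of A's loop output
def gOut : Bool → List Char → List Char
  | _, [] => []
  | q, c :: cs =>
    if c = '"' then '"' :: gOut (!q) cs
    else if c = ' ' then (if q then gOut q cs else ' ' :: gOut q cs)
    else c :: gOut q cs

-- odd/even segment processing, in spec form (q = true: current head segment is inside quotes)
def procs : Bool → List (List Char) → List (List Char)
  | _, [] => []
  | false, p :: ps => p :: procs true ps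
  | true, p :: ps => p.filter (· != ' ') :: procs false ps

theorem foldA (cs : List Char) : ∀ (q : Bool) (acc : List Char),
    (cs.foldl qaStep (q, acc)).2 = acc ++ gOut q cs := by
  induction cs with
  | nil => intro q acc; simp [gOut]
  | cons c cs ih =>
    intro q acc
    by_cases hq : c = '"'
    · cases q <;> simp [qaStep, hq, gOut, ih]
    · by_cases hs : c = ' '
      · cases q <;> simp [qaStep, hs, gOut, ih]
      · cases q <;> simp [qaStep, hq, hs, gOut, ih]

theorem procs_ne_nil (q : Bool) (ps : List (List Char)) (h : ps ≠ []) : procs q ps ≠ [] := by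
  cases ps with
  | nil => exact absurd rfl h
  | cons p ps => cases q <;> simp [procs]

theorem join_char_cons (sep x : List Char) (c : Char) (ps : List (List Char)) :
    PySem.Chars.join sep ((c :: x) :: ps) = c :: PySem.Chars.join sep (x :: ps) := by
  cases ps with
  | nil => simp [PySem.Chars.join_singleton]
  | cons p ps => simp [PySem.Chars.join_cons_cons]

theorem gOut_eq_join (cs : List Char) : ∀ q : Bool,
    gOut q cs = PySem.Chars.join ['"'] (procs q (List.splitOnP (· == '"') cs)) := by
  induction cs with
  | nil =>
    intro q
    cases q <;> simp [gOut, List.splitOnP_nil, procs, PySem.Chars.join_singleton]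
  | cons c cs ih =>
    intro q
    have hne : List.splitOnP (fun x => x == '"') cs ≠ [] := List.splitOnP_ne_nil _ cs
    by_cases hq : c = '"'
    · have h1 : procs (!q) (List.splitOnP (fun x => x == '"') cs) ≠ [] :=
        procs_ne_nil _ _ hne
      obtain ⟨h', t', hht'⟩ := List.exists_cons_of_ne_nil h1
      cases q <;>
        simp only [gOut, hq, if_pos, List.splitOnP_cons, beq_self_eq_true, procs,
          ih, Bool.not_false, Bool.not_true] <;>
        simp only [Bool.not_false, Bool.not_true] at hht' <;>
        rw [hht', PySem.Chars.join_cons_cons] <;> simp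
    · obtain ⟨h, t, hht⟩ := List.exists_cons_of_ne_nil hne
      have hq' : (c == '"') = false := by simp [hq]
      by_cases hs : c = ' '
      · cases q <;>
          simp [gOut, hs, List.splitOnP_cons, hht, procs, ih, join_char_cons]
      · have hs' : (c != ' ') = true := by simp [hs]
        cases q <;>
          simp [gOut, hq, hs, List.splitOnP_cons, hq', hht, procs, ih, join_char_cons, hs']

theorem replace_go_space : ∀ (fuel : Nat) (l acc : List Char), l.length ≤ fuel →
    PySem.Chars.replace.go [' '] [] fuel l acc = acc.reverse ++ l.filter (· != ' ') := by
  intro fuel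
  induction fuel with
  | zero =>
    intro l acc h
    have : l = [] := List.eq_nil_of_length_eq_zero (Nat.le_zero.mp h)
    subst this; simp [PySem.Chars.replace.go]
  | succ n ih =>
    intro l acc h
    cases l with
    | nil => simp [PySem.Chars.replace.go]
    | cons c t =>
      by_cases hc : c = ' '
      · subst hc
        simp [PySem.Chars.replace.go, List.isPrefixOf, ih t acc (by simpa using h)]
      · have hc0 : ¬(' ' = c) := fun h => hc h.symm
        have hc' : (' ' == c) = false := by simp [hc0]
        simp [PySem.Chars.replace.go, List.isPrefixOf, hc', hc,
          ih t (c :: acc) (by simpa using Nat.le_of_succ_le_succ h)]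

theorem replace_space (p : List Char) :
    PySem.Chars.replace p [' '] [] = p.filter (· != ' ') := by
  simp [PySem.Chars.replace, replace_go_space p.length p [] le_rfl]

theorem modifyHead_id' {α : Type} (l : List α) : List.modifyHead (fun x => x) l = l := by
  cases l <;> simp

theorem splitOn_go_quote : ∀ (fuel : Nat) (l cur : List Char) (acc : List (List Char)),
    l.length < fuel →
    PySem.Chars.splitOn.go ['"'] fuel l cur acc =
      acc.reverse ++ List.modifyHead (cur.reverse ++ ·) (List.splitOnP (· == '"') l) := by
  intro fuel
  induction fuel with
  | zero => intro l cur acc h; omega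
  | succ n ih =>
    intro l cur acc h
    cases l with
    | nil => simp [PySem.Chars.splitOn.go, List.splitOnP_nil]
    | cons c t =>
      by_cases hc : c = '"'
      · subst hc
        simp [PySem.Chars.splitOn.go, List.isPrefixOf, List.splitOnP_cons,
          ih t [] (cur.reverse :: acc) (by simpa using Nat.lt_of_succ_lt_succ h),
          modifyHead_id']
      · have hc0 : ¬('"' = c) := fun h => hc h.symm
        have hc' : ('"' == c) = false := by simp [hc0]
        have hc'' : (c == '"') = false := by simp [hc]
        simp [PySem.Chars.splitOn.go, List.isPrefixOf, hc', hc'', List.splitOnP_cons,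
          ih t (c :: cur) acc (by simpa using Nat.lt_of_succ_lt_succ h),
          List.modifyHead_modifyHead, Function.comp_def]

theorem splitOn_quote (cs : List Char) :
    PySem.Chars.splitOn cs ['"'] = List.splitOnP (· == '"') cs := by
  simp [PySem.Chars.splitOn, splitOn_go_quote (cs.length + 1) cs [] [] (by omega),
    modifyHead_id']

theorem parity_flip (n : ℤ) : (((n + 1) % 2 == 0) : Bool) = !((n % 2 == 0) : Bool) := by
  rcases Int.emod_two_eq_zero_or_one n with h | h
  · have h2 : (n + 1) % 2 = 1 := by omega
    simp [h, h2]
  · have h2 : (n + 1) % 2 = 0 := by omega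
    simp [h, h2]

theorem enum_procs : ∀ (ps : List (List Char)) (n : ℤ),
    (PySem.List.enumerate ps n).map
      (fun ip => if ip.1 % 2 == 0 then ip.2 else PySem.Chars.replace ip.2 [' '] []) =
      procs (!(n % 2 == 0)) ps := by
  intro ps
  induction ps with
  | nil => intro n; simp [PySem.List.enumerate, procs]
  | cons p ps ih =>
    intro n
    rw [PySem.List.enumerate_cons, List.map_cons, ih (n + 1), parity_flip, Bool.not_not]
    by_cases h : n % 2 = 0
    · have hb : (n % 2 == 0) = true := by simp [h]
      simp [hb, procs]
    · have hb : (n % 2 == 0) = false := by simp [h]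
      simp [hb, procs, replace_space]

theorem enum_map_toList : ∀ (parts : List String) (n : ℤ),
    ((PySem.List.enumerate parts n).map
      (fun ip => if ip.1 % 2 == 0 then ip.2 else PySem.Str.replace ip.2 " " "")).map
        String.toList =
    (PySem.List.enumerate (parts.map String.toList) n).map
      (fun ip => if ip.1 % 2 == 0 then ip.2 else PySem.Chars.replace ip.2 [' '] []) := by
  intro parts
  induction parts with
  | nil => intro n; simp [PySem.List.enumerate]
  | cons p ps ih =>
    intro n
    simp only [List.map_cons, PySem.List.enumerate_cons, ih (n + 1)]
    by_cases h : n % 2 = 0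
    · have hb : (n % 2 == 0) = true := by simp [h]
      simp [hb]
    · have hb : (n % 2 == 0) = false := by simp [h]
      simp [hb, PySem.Str.toList_replace]

theorem split_parts (s : String) :
    ((PySem.Str.split? s "\"").getD []).map String.toList =
      PySem.Chars.splitOn s.toList ['"'] := by
  have h := PySem.Str.split?_map s "\""
  rw [PySem.Chars.split?] at h
  simp only [List.isEmpty] at h
  cases hx : PySem.Str.split? s "\"" with
  | none => rw [hx] at h; simp at h
  | some ps => rw [hx] at h; simp at h ⊢; simpa using h

theorem alt_toList (s : String) : (quotation_process_alt s).toList =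
    PySem.Chars.join ['"'] (procs false (List.splitOnP (· == '"') s.toList)) := by
  have h0 : (!(((0 : ℤ) % 2 == 0) : Bool)) = false := by decide
  have hq : ("\"" : String).toList = ['"'] := by decide
  rw [quotation_process_alt, PySem.Str.toList_join, List.map_map,
    ← List.map_map (g := String.toList), enum_map_toList _ 0, enum_procs _ 0, h0,
    split_parts, splitOn_quote, hq]

-- ===== VERDICT (by name: the statement is the Claim_ definition above) =====
theorem quotation_process_spec : Claim_equal_quotation_process := by
  intro s _
  unfold Spec_quotation_process
  apply String.toList_inj.mp
  rw [alt_toList]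
  calc (quotation_process s).toList
      = gOut false s.toList := by
        simp [quotation_process, foldA s.toList false []]
    _ = PySem.Chars.join ['"'] (procs false (List.splitOnP (· == '"') s.toList)) :=
        gOut_eq_join s.toList false
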